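-- pv_equiv track=rewrite | github.com/gswyhq/bert4keras | examples/bio2bioes.py | bio2bioes
-- ===== SOURCE A (Python) =====
-- def bio2bioes(word_flag):
--     """
--     BIO标注格式转换为BIOES格式
--     :param word_flag: [['谢', 'B-Shiyi'], ['德', 'I-Shiyi'], ['风', 'I-Shiyi'], ['的', 'O'], ['出', 'O'], ['生', 'O'], ['日', 'O'], ['期', 'O'], ['是', 'O']]
--     :return:
--     """
--     new_word_flag = []
--     words_len = len(word_flag)
--     for _index, (word, flag) in enumerate(word_flag, 1):
--         if flag[0] in ['B', 'O']:
--             if flag[0] == 'B' and (_index == words_len or word_flag[_index][1][0] == 'O'):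
--                 # 最后，或者独立成词
--                 flag = 'S' + flag[1:]
--             new_word_flag.append([word, flag])
--         elif flag[0] == 'I':
--             if _index == words_len or word_flag[_index][1][0] == 'O':
--                 flag = 'E' + flag[1:]
--             new_word_flag.append([word, flag])
--         else:
--             new_word_flag.append([word, flag])
--     return new_word_flag
-- ===== SOURCE B (Python) =====
-- def bio2bioes(word_flag):
--     def trans(row, next_o):
--         word, flag = row
--         c = flag[0]
--         if c == 'B' and next_o:
--             return [word, 'S' + flag[1:]]
--         if c == 'I' and next_o:
--             return [word, 'E' + flag[1:]]
--         return [word, flag]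
--     out = []
--     next_o = True
--     for row in reversed(word_flag):
--         out.append(trans(row, next_o))
--         next_o = row[1][0] == 'O'
--     out.reverse()
--     return out
-- ===== Notes on version B (the rewrite author's own statement) =====
-- stated objective: alternative
-- what changed: Replaced the indexed forward loop that peeks at word_flag[_index][1][0] with a right-to-left pass carrying a single 'next flag starts with O' boolean, so no lookahead indexing is needed.
import Mathlib
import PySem

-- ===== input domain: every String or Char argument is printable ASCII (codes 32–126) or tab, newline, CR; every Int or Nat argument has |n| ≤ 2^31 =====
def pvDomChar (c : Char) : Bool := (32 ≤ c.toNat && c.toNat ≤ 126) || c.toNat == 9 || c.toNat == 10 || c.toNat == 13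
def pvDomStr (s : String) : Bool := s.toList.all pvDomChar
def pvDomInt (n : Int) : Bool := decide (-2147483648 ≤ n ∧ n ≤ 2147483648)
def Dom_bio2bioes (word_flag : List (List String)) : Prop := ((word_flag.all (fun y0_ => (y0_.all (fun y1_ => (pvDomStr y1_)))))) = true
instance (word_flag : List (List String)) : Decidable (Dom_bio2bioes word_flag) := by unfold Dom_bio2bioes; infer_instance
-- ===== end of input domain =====

-- B rewrites A's forward loop with lookahead indexing as a right-to-left pass carrying a
-- "next flag starts with 'O'" boolean; equivalence of return values is proved on Pre_.

-- shared row accessors: row[0], row[1], flag[0]; the getD/headD defaults are exact under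
-- Pre_bio2bioes (every row has length 2 and a nonempty flag)
def pvWord (row : List String) : String := (PySem.List.pyGet? row 0).getD ""
def pvFlag (row : List String) : String := (PySem.List.pyGet? row 1).getD ""
def pvHead (s : String) : Char := s.toList.headD ' '

-- ===== PORT A =====
-- the loop body: flag[0] tests and the lookahead word_flag[_index][1][0]
def bioAstep (words_len : Nat) (full : List (List String)) (idx : Nat) (row : List String) : List String :=
  let word := pvWord row
  let flag := pvFlag row
  let c := pvHead flag
  if c = 'B' ∨ c = 'O' then
    if c = 'B' ∧ (idx = words_len ∨ pvHead (pvFlag ((PySem.List.pyGet? full (idx : Int)).getD [])) = 'O') then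
      [word, String.ofList ('S' :: flag.toList.drop 1)]   -- 'S' + flag[1:]
    else [word, flag]
  else if c = 'I' then
    if idx = words_len ∨ pvHead (pvFlag ((PySem.List.pyGet? full (idx : Int)).getD [])) = 'O' then
      [word, String.ofList ('E' :: flag.toList.drop 1)]   -- 'E' + flag[1:]
    else [word, flag]
  else [word, flag]

-- the loop: for _index, (word, flag) in enumerate(word_flag, 1), appending in order
def bioAgo (words_len : Nat) (full : List (List String)) (idx : Nat) : List (List String) → List (List String)
  | [] => []
  | row :: rest => bioAstep words_len full idx row :: bioAgo words_len full (idx + 1) rest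

def bio2bioes (word_flag : List (List String)) : List (List String) :=
  bioAgo word_flag.length word_flag 1 word_flag

-- ===== PORT B =====
-- Source B's helper trans(row, next_o)
def pvTrans (row : List String) (e : Bool) : List String :=
  let flag := pvFlag row
  let c := pvHead flag
  if c = 'B' ∧ e = true then [pvWord row, String.ofList ('S' :: flag.toList.drop 1)]
  else if c = 'I' ∧ e = true then [pvWord row, String.ofList ('E' :: flag.toList.drop 1)]
  else [pvWord row, flag]

-- one step of the reverse pass: append trans(row, next_o), then next_o = row[1][0] == 'O'
def bioBstep (st : List (List String) × Bool) (row : List String) : List (List String) × Bool :=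
  (st.1 ++ [pvTrans row st.2], pvHead (pvFlag row) == 'O')

def bio2bioes_alt (word_flag : List (List String)) : List (List String) :=
  ((word_flag.reverse.foldl bioBstep ([], true)).1).reverse

-- ===== PRECONDITION & SPEC =====
-- Pre_ = exactly the inputs where the Python A returns: every row unpacks as a pair
-- (length 2) and every flag is nonempty (flag[0] is read for every row).
def Pre_bio2bioes (word_flag : List (List String)) : Prop :=
  ∀ row ∈ word_flag, row.length = 2 ∧ (PySem.List.pyGet? row 1).getD "" ≠ ""
instance (word_flag : List (List String)) : Decidable (Pre_bio2bioes word_flag) := by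
  unfold Pre_bio2bioes; infer_instance

def pvWitness_bio2bioes : List (List String) :=
  [["a", "B-X"], ["b", "I-X"], ["c", "O"], ["d", "B-Y"]]

def Spec_bio2bioes (word_flag : List (List String)) (out : List (List String)) : Prop := out = bio2bioes_alt word_flag
instance (word_flag : List (List String)) (out : List (List String)) : Decidable (Spec_bio2bioes word_flag out) := by unfold Spec_bio2bioes; infer_instance

-- ===== CLAIM (what is proved, stated in full; the proofs are below) =====
def Claim_equal_bio2bioes : Prop := ∀ (word_flag : List (List String)), Dom_bio2bioes word_flag → Pre_bio2bioes word_flag → Spec_bio2bioes word_flag (bio2bioes word_flag)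

-- ===== LEMMAS AND PROOFS =====

-- "the next flag starts with 'O' (or there is no next element)", on the ORIGINAL tail
def pvNextO (rest : List (List String)) : Bool :=
  decide (rest = []) || (pvHead (pvFlag (rest.headD [])) == 'O')

-- the common per-element characterisation both ports are reduced to
def pvSpecF : List (List String) → List (List String)
  | [] => []
  | r :: rest => pvTrans r (pvNextO rest) :: pvSpecF rest

lemma step_eq (n : Nat) (full : List (List String)) (idx : Nat) (row : List String)
    (rest' : List (List String))
    (h1 : idx = n ↔ rest' = [])
    (h2 : (PySem.List.pyGet? full (idx : Int)).getD [] = rest'.headD []) :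
    bioAstep n full idx row = pvTrans row (pvNextO rest') := by
  have hc : (idx = n ∨ pvHead (pvFlag ((PySem.List.pyGet? full (idx : Int)).getD [])) = 'O')
      ↔ pvNextO rest' = true := by
    rw [h2]; simp [pvNextO, h1]
  by_cases hB : pvHead (pvFlag row) = 'B' <;>
    by_cases hI : pvHead (pvFlag row) = 'I' <;>
    by_cases hO : pvHead (pvFlag row) = 'O' <;>
    by_cases hE : pvNextO rest' = true <;>
    simp_all [bioAstep, pvTrans]

lemma lemA : ∀ (rest pre : List (List String)),
    bioAgo (pre ++ rest).length (pre ++ rest) (pre.length + 1) rest = pvSpecF rest := by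
  intro rest
  induction rest with
  | nil => intro pre; rfl
  | cons row rest' ih =>
    intro pre
    have htail := ih (pre ++ [row])
    simp only [List.append_assoc, List.cons_append, List.nil_append, List.length_append,
      List.length_cons, List.length_nil] at htail ⊢
    rw [bioAgo, pvSpecF]
    congr 1
    · apply step_eq
      · constructor
        · intro h
          have : rest'.length = 0 := by omega
          simpa using this
        · intro h; subst h; simp
      · rw [PySem.List.pyGet?_natCast]
        rcases rest' with _ | ⟨r, rs⟩
        · simp
        · simp

lemma lemB : ∀ (l acc : List (List String)),
    List.foldl bioBstep (acc, true) l.reverse = (acc ++ (pvSpecF l).reverse, pvNextO l) := by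
  intro l
  induction l with
  | nil => intro acc; simp [pvNextO, pvSpecF]
  | cons r l' ih =>
    intro acc
    rw [List.reverse_cons, List.foldl_append, ih]
    simp [bioBstep, pvSpecF, pvNextO]

lemma A_eq_spec (wf : List (List String)) : bio2bioes wf = pvSpecF wf := by
  have h := lemA wf []
  simpa [bio2bioes] using h

lemma B_eq_spec (wf : List (List String)) : bio2bioes_alt wf = pvSpecF wf := by
  unfold bio2bioes_alt
  rw [lemB wf []]
  simp

-- ===== VERDICT (by name: the statement is the Claim_ definition above) =====
theorem bio2bioes_spec : Claim_equal_bio2bioes := by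
  intro wf _ _
  unfold Spec_bio2bioes
  rw [A_eq_spec, B_eq_spec]
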